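-- pv_equiv track=rewrite | github.com/riverland01/Data_agg | src/data_agg/cli.py | _infer_universe_dataset
-- ===== SOURCE A (Python) =====
-- def _infer_universe_dataset(rows: list[dict]) -> str | None:
--     if not rows:
--         return None
--
--     etf_symbols = {str(row.get("etf_symbol") or "").upper() for row in rows}
--     etf_symbols.discard("")
--     if etf_symbols:
--         return "spdr_sector_etf_holdings"
--
--     source_urls = {str(row.get("source_url") or "").lower() for row in rows}
--     if any("ssga.com" in url for url in source_urls):
--         return "spdr_sector_etf_holdings"
--     if any("ishares.com" in url for url in source_urls):
--         return "ivv_holdings"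
--
--     return None
-- ===== SOURCE B (Python) =====
-- def _infer_universe_dataset(rows: list[dict]) -> str | None:
--     saw_ssga = saw_ishares = False
--     for row in rows:
--         if row.get("etf_symbol"):
--             return "spdr_sector_etf_holdings"
--         url = str(row.get("source_url") or "").lower()
--         saw_ssga = saw_ssga or "ssga.com" in url
--         saw_ishares = saw_ishares or "ishares.com" in url
--     if saw_ssga:
--         return "spdr_sector_etf_holdings"
--     if saw_ishares:
--         return "ivv_holdings"
--     return None
-- ===== Notes on version B (the rewrite author's own statement) =====
-- stated objective: simpler
-- what changed: Replaces A's two set-comprehension passes (build a set of uppercased etf symbols, then a set of lowercased urls, then scan them) with one fused loop over the rows that returns immediately on a truthy etf_symbol and otherwise accumulates two boolean flags for the url substring tests, resolved after the loop; no sets are built and the redundant empty-rows guard disappears.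
import Mathlib
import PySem

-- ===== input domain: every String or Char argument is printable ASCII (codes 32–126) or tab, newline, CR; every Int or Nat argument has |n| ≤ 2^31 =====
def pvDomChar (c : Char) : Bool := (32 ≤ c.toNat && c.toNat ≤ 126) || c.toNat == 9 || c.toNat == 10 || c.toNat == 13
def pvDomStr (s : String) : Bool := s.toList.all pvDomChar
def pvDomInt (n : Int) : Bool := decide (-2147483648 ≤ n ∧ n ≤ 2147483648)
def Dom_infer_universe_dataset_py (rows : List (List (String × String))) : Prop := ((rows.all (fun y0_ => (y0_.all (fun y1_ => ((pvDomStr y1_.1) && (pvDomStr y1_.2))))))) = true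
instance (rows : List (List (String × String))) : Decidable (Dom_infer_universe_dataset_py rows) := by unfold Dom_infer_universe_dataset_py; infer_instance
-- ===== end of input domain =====

-- B fuses A's two set-building passes into one loop over the rows with an early return on a
-- truthy etf_symbol and two boolean flags for the url substring tests (objective: simpler).

-- ===== PORT A =====
-- str(row.get("etf_symbol") or "").upper() — values are strings, so `x or ""` is getD "" and str() is the identity
def pvSymA (row : List (String × String)) : String :=
  PySem.Str.upper (((PySem.Dict.mk row).get? "etf_symbol").getD "")

def pvUrlA (row : List (String × String)) : String :=
  PySem.Str.lower (((PySem.Dict.mk row).get? "source_url").getD "")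

def infer_universe_dataset_py (rows : List (List (String × String))) : Option String :=
  if rows = [] then none
  else
    let etf_symbols : PySem.Set String :=
      PySem.Set.discard (PySem.Set.ofList (rows.map pvSymA)) ""
    if etf_symbols ≠ [] then some "spdr_sector_etf_holdings"
    else
      let source_urls : PySem.Set String := PySem.Set.ofList (rows.map pvUrlA)
      if source_urls.any (fun url => PySem.Str.isIn "ssga.com" url) then
        some "spdr_sector_etf_holdings"
      else if source_urls.any (fun url => PySem.Str.isIn "ishares.com" url) then
        some "ivv_holdings"
      else none

-- ===== PORT B =====
-- the for-loop of Source B with its two flags; `if row.get("etf_symbol"):` is truthy iff the lookup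
-- yields a non-empty string, i.e. getD "" ≠ ""
def pvAltLoop (rows : List (List (String × String))) (saw_ssga saw_ishares : Bool) : Option String :=
  match rows with
  | [] =>
    if saw_ssga then some "spdr_sector_etf_holdings"
    else if saw_ishares then some "ivv_holdings"
    else none
  | row :: rest =>
    if ((PySem.Dict.mk row).get? "etf_symbol").getD "" ≠ "" then
      some "spdr_sector_etf_holdings"
    else
      let url := PySem.Str.lower (((PySem.Dict.mk row).get? "source_url").getD "")
      pvAltLoop rest (saw_ssga || PySem.Str.isIn "ssga.com" url)
        (saw_ishares || PySem.Str.isIn "ishares.com" url)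

def infer_universe_dataset_py_alt (rows : List (List (String × String))) : Option String :=
  pvAltLoop rows false false

-- ===== PRECONDITION & SPEC =====
def Spec_infer_universe_dataset_py (rows : List (List (String × String))) (out : Option String) : Prop := out = infer_universe_dataset_py_alt rows
instance (rows : List (List (String × String))) (out : Option String) : Decidable (Spec_infer_universe_dataset_py rows out) := by unfold Spec_infer_universe_dataset_py; infer_instance

-- ===== CLAIM (what is proved, stated in full; the proofs are below) =====
def Claim_equal_infer_universe_dataset_py : Prop := ∀ (rows : List (List (String × String))), Dom_infer_universe_dataset_py rows → Spec_infer_universe_dataset_py rows (infer_universe_dataset_py rows)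

-- ===== LEMMAS AND PROOFS =====

theorem pv_if_congr {c₁ c₂ : Prop} [Decidable c₁] [Decidable c₂] {α : Type}
    {a b : α} (h : c₁ ↔ c₂) : (if c₁ then a else b) = (if c₂ then a else b) := by
  by_cases hc : c₂
  · rw [if_pos (h.mpr hc), if_pos hc]
  · rw [if_neg (fun hh => hc (h.mp hh)), if_neg hc]

theorem pv_upper_eq_empty (s : String) : PySem.Str.upper s = "" ↔ s = "" := by
  constructor
  · intro h
    have h' := congrArg String.toList h
    rw [PySem.Str.toList_upper] at h'
    simp only [PySem.Chars.upper] at h'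
    exact String.toList_injective (by simpa using h')
  · intro h; subst h; rfl

theorem pv_sym_empty (row : List (String × String)) :
    pvSymA row = "" ↔ ((PySem.Dict.mk row).get? "etf_symbol").getD "" = "" :=
  pv_upper_eq_empty _

theorem pv_exists_map {α β : Type} (f : α → β) (l : List α) (p : β → Prop) :
    (∃ x, x ∈ l.map f ∧ p x) ↔ ∃ a, a ∈ l ∧ p (f a) := by
  constructor
  · rintro ⟨x, hx, hp⟩
    rcases List.mem_map.mp hx with ⟨a, ha, rfl⟩
    exact ⟨a, ha, hp⟩
  · rintro ⟨a, ha, hp⟩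
    exact ⟨f a, List.mem_map_of_mem ha, hp⟩

theorem pv_altLoop_eq (rows : List (List (String × String))) (saw_ssga saw_ishares : Bool) :
    pvAltLoop rows saw_ssga saw_ishares =
      if ∃ row ∈ rows, ((PySem.Dict.mk row).get? "etf_symbol").getD "" ≠ "" then
        some "spdr_sector_etf_holdings"
      else if saw_ssga = true ∨ ∃ row ∈ rows, PySem.Str.isIn "ssga.com" (pvUrlA row) = true then
        some "spdr_sector_etf_holdings"
      else if saw_ishares = true ∨ ∃ row ∈ rows, PySem.Str.isIn "ishares.com" (pvUrlA row) = true then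
        some "ivv_holdings"
      else none := by
  induction rows generalizing saw_ssga saw_ishares with
  | nil => cases saw_ssga <;> cases saw_ishares <;> simp [pvAltLoop]
  | cons row rest ih =>
    by_cases h : ((PySem.Dict.mk row).get? "etf_symbol").getD "" ≠ ""
    · simp only [pvAltLoop, if_pos h]
      rw [if_pos ⟨row, List.mem_cons_self, h⟩]
    · simp only [pvAltLoop, if_neg h]
      rw [ih]
      have h0 : (((PySem.Dict.mk row).get? "etf_symbol").getD "") = "" := by simpa using h
      simp [h0, pvUrlA, Bool.or_eq_true, or_assoc]

theorem pv_discard_ne_nil (l : List String) :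
    PySem.Set.discard (PySem.Set.ofList l) "" ≠ [] ↔ ∃ x ∈ l, x ≠ "" := by
  rw [← List.isEmpty_eq_false_iff, List.isEmpty_eq_false_iff_exists_mem]
  constructor
  · rintro ⟨x, hx⟩
    have := (PySem.Set.mem_discard _ _ _).mp hx
    exact ⟨x, (PySem.Set.mem_ofList _ _).mp this.1, this.2⟩
  · rintro ⟨x, hx, hne⟩
    exact ⟨x, (PySem.Set.mem_discard _ _ _).mpr ⟨(PySem.Set.mem_ofList _ _).mpr hx, hne⟩⟩

theorem pv_set_any (l : List String) (p : String → Bool) :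
    (PySem.Set.ofList l).any p = true ↔ ∃ x ∈ l, p x = true := by
  rw [List.any_eq_true]
  constructor
  · rintro ⟨x, hx, hp⟩
    exact ⟨x, (PySem.Set.mem_ofList _ _).mp hx, hp⟩
  · rintro ⟨x, hx, hp⟩
    exact ⟨x, (PySem.Set.mem_ofList _ _).mpr hx, hp⟩

-- ===== VERDICT (by name: the statement is the Claim_ definition above) =====
theorem infer_universe_dataset_py_spec : Claim_equal_infer_universe_dataset_py := by
  intro rows _
  unfold Spec_infer_universe_dataset_py infer_universe_dataset_py infer_universe_dataset_py_alt
  rw [pv_altLoop_eq]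
  by_cases hnil : rows = []
  · subst hnil; simp
  · rw [if_neg hnil]
    rw [pv_if_congr (pv_discard_ne_nil (rows.map pvSymA))]
    rw [pv_if_congr (pv_set_any (rows.map pvUrlA) (fun url => PySem.Str.isIn "ssga.com" url))]
    rw [pv_if_congr (pv_set_any (rows.map pvUrlA) (fun url => PySem.Str.isIn "ishares.com" url))]
    simp only [ne_eq, pv_exists_map, pv_sym_empty, Bool.false_eq_true, false_or]
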